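-- pv_equiv track=rewrite | github.com/alexchristy/SSA-Document-Analyzer | flight_utils.py | find_similar_dicts
-- ===== SOURCE A (Python) =====
-- from typing import Any, Dict, List, Optional, Tuple, Union, cast
--
-- Element = Union[str, int, float, Dict[str, "Element"]]
--
-- GenericDict = Dict[str, Element]
--
-- def compare_nested_dicts(elem1: Element, elem2: Element) -> int:
--     """Compare two elements, which could be nested dictionaries.
--
--     Args:
--     ----
--         elem1 (Element): The first element to compare.
--         elem2 (Element): The second element to compare.
--
--     Returns:
--     -------
--         int: The number of matching elements.
--     """
--     if isinstance(elem1, dict) and isinstance(elem2, dict):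
--         # Count matching elements in nested dictionaries
--         return sum(
--             compare_nested_dicts(elem1[key], elem2[key])
--             for key in elem1
--             if key in elem2
--         )
--
--     # Direct comparison for non-dictionary elements
--     return int(elem1 == elem2)
--
-- def find_similar_dicts(
--     base_dict_list: List[GenericDict],
--     comp_dict_list: List[GenericDict],
--     min_num_matching_keys: int = 3,
-- ) -> List[GenericDict]:
--     """Find dictionaries in comp_dict_list that are similar to a dictionary in base_dict_list.
--
--     Args:
--     ----
--         base_dict_list (List[GenericDict]): Base list of dictionaries to compare against.
--         comp_dict_list (List[GenericDict]): List of dictionaries to compare.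
--         min_num_matching_keys (int, optional): The minimum number of matching keys required to consider the dictionaries similar. Default is 3.
--
--     Returns:
--     -------
--         List[GenericDict]: A list of dictionaries from comp_dict_list that are similar to a dictionary in base_dict_list.
--     """
--     # Ensure that all elements in the lists are dictionaries
--     for d in base_dict_list + comp_dict_list:
--         if not isinstance(d, dict):
--             msg = "All elements in the lists must be dictionaries"
--             raise TypeError(msg)
--
--     similar_dicts = []
--
--     for comp_dict in comp_dict_list:
--         for new_dict in base_dict_list:
--             # Count matching elements (considering nested dictionaries)
--             match_count = sum(
--                 compare_nested_dicts(comp_dict[key], new_dict[key])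
--                 for key in comp_dict
--                 if key in new_dict
--             )
--
--             # Check if there are at least 3 matches
--             if match_count >= min_num_matching_keys:
--                 similar_dicts.append(comp_dict)
--                 break  # Break inner loop if a match is found
--
--     return similar_dicts
-- ===== SOURCE B (Python) =====
-- def find_similar_dicts(base_dict_list, comp_dict_list, min_num_matching_keys=3):
--     # Inverted index: (key, value) item -> indices of base dicts containing it.
--     index = {}
--     for i, d in enumerate(base_dict_list):
--         for item in d.items():
--             index.setdefault(item, []).append(i)
--
--     similar_dicts = []
--     for comp_dict in comp_dict_list:
--         counts = [0] * len(base_dict_list)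
--         for item in comp_dict.items():
--             for i in index.get(item, ()):
--                 counts[i] += 1
--         if any(c >= min_num_matching_keys for c in counts):
--             similar_dicts.append(comp_dict)
--     return similar_dicts
-- ===== Notes on version B (the rewrite author's own statement) =====
-- stated objective: faster
-- what changed: Replaces A's nested comp-by-base scan (re-counting matching key/value pairs for every pair of dicts) with an inverted index from (key,value) items to base-dict indices built once; each comp dict is classified by accumulating per-base hit counts from the postings of its own items into a counts array.
import Mathlib
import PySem

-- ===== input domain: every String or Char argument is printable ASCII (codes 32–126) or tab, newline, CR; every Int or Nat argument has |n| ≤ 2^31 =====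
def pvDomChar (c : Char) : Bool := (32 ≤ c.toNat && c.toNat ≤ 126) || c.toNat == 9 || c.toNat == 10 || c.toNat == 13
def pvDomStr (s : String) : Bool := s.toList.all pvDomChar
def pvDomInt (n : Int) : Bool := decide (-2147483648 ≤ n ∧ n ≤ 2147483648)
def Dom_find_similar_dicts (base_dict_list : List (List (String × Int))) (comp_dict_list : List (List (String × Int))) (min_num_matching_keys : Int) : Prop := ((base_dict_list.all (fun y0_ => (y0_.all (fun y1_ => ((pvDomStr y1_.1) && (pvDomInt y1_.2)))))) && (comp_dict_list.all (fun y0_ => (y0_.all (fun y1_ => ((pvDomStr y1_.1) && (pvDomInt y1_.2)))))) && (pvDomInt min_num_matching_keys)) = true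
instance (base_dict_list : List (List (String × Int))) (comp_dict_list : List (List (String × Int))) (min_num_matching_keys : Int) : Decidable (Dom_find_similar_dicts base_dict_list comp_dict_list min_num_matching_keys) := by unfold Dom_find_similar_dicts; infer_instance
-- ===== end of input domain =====

-- B replaces A's nested comp-by-base rescan with an inverted index (item -> base indices) built once,
-- accumulating per-base hit counts into an array (objective: faster).

-- ===== PORT A =====
-- compare_nested_dicts on the leaves reached here (dicts are flat str->int): int(elem1 == elem2)
def pvCompareLeaf (v1 v2 : Int) : Int := if v1 = v2 then 1 else 0

-- sum(compare_nested_dicts(comp_dict[key], new_dict[key]) for key in comp_dict if key in new_dict)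
def pvMatchCount (cd bd : PySem.Dict String Int) : Int :=
  (cd.items.filter (fun kv => bd.contains kv.1)).foldl
    (fun acc kv => acc + pvCompareLeaf kv.2 (bd.getD kv.1 0)) 0

-- the inner 'for new_dict in base_dict_list: … break' loop: true iff the loop appended comp_dict (and broke)
def pvInner (cd : PySem.Dict String Int) (bds : List (PySem.Dict String Int)) (k : Int) : Bool :=
  match bds with
  | [] => false
  | bd :: rest => if k ≤ pvMatchCount cd bd then true else pvInner cd rest k

def find_similar_dicts (base_dict_list : List (List (String × Int))) (comp_dict_list : List (List (String × Int))) (min_num_matching_keys : Int) : List (List (String × Int)) :=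
  let bds := base_dict_list.map (fun d => PySem.Dict.ofList d)
  (comp_dict_list.map (fun d => PySem.Dict.ofList d)).foldl
    (fun acc cd => if pvInner cd bds min_num_matching_keys then acc ++ [cd.items] else acc) []

-- ===== PORT B =====
-- enumerate(base_dict_list): list indices are natural numbers 0..len-1, so Nat is exact here
def pvEnumNat {α : Type} (l : List α) (s : Nat) : List (Nat × α) :=
  match l with
  | [] => []
  | x :: xs => (s, x) :: pvEnumNat xs (s + 1)

-- index.setdefault(item, []).append(i) over enumerate(base_dict_list)
def pvIndexB (base : List (List (String × Int))) : PySem.Dict (String × Int) (List Nat) :=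
  (pvEnumNat (base.map (fun d => (PySem.Dict.ofList d).items)) 0).foldl
    (fun idx p => p.2.foldl (fun idx it => idx.modify it [] (· ++ [p.1])) idx) PySem.Dict.empty

def find_similar_dicts_alt (base_dict_list : List (List (String × Int))) (comp_dict_list : List (List (String × Int))) (min_num_matching_keys : Int) : List (List (String × Int)) :=
  let idx := pvIndexB base_dict_list
  comp_dict_list.foldl
    (fun acc d =>
      -- counts = [0] * len(base_dict_list); for item …: for i in index.get(item, ()): counts[i] += 1
      let counts :=
        ((PySem.Dict.ofList d).items).foldl
          (fun c it => (idx.getD it []).foldl (fun c i => c.set i (c.getD i 0 + 1)) c)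
          (List.replicate base_dict_list.length (0 : Int))
      if counts.any (fun c => min_num_matching_keys ≤ c) then acc ++ [(PySem.Dict.ofList d).items] else acc)
    []

-- ===== PRECONDITION & SPEC =====
def Spec_find_similar_dicts (base_dict_list : List (List (String × Int))) (comp_dict_list : List (List (String × Int))) (min_num_matching_keys : Int) (out : List (List (String × Int))) : Prop := out = find_similar_dicts_alt base_dict_list comp_dict_list min_num_matching_keys
instance (base_dict_list : List (List (String × Int))) (comp_dict_list : List (List (String × Int))) (min_num_matching_keys : Int) (out : List (List (String × Int))) : Decidable (Spec_find_similar_dicts base_dict_list comp_dict_list min_num_matching_keys out) := by unfold Spec_find_similar_dicts; infer_instance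

-- ===== CLAIM (what is proved, stated in full; the proofs are below) =====
def Claim_equal_find_similar_dicts : Prop := ∀ (base_dict_list : List (List (String × Int))) (comp_dict_list : List (List (String × Int))) (min_num_matching_keys : Int), Dom_find_similar_dicts base_dict_list comp_dict_list min_num_matching_keys → Spec_find_similar_dicts base_dict_list comp_dict_list min_num_matching_keys (find_similar_dicts base_dict_list comp_dict_list min_num_matching_keys)

-- ===== LEMMAS AND PROOFS =====

-- a fold summing a 0/1 indicator is countP
lemma pv_foldl_add_ite (p : (String × Int) → Prop) [DecidablePred p] (l : List (String × Int)) (n : Int) :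
    l.foldl (fun acc kv => acc + (if p kv then (1:Int) else 0)) n = n + (l.countP (fun kv => decide (p kv)) : Int) := by
  induction l generalizing n with
  | nil => simp
  | cons x xs ih =>
    by_cases h : p x
    · simp [h, ih]; ring
    · simp [h, ih]

-- 'key in bd and bd[key] == value' is exactly item membership, for a nodup-keys dict
lemma pv_item_test (bd : PySem.Dict String Int) (hnd : bd.keys.Nodup) (kv : String × Int) :
    (bd.contains kv.1 && decide (kv.2 = bd.getD kv.1 0)) = bd.items.contains kv := by
  rcases kv with ⟨k, v⟩
  rw [Bool.eq_iff_iff]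
  simp only [Bool.and_eq_true, decide_eq_true_eq, List.contains_iff_mem]
  constructor
  · rintro ⟨hc, hv⟩
    rw [PySem.Dict.contains_eq_isSome_get?] at hc
    obtain ⟨w, hw⟩ := Option.isSome_iff_exists.mp hc
    have hg := PySem.Dict.getD_of_get?_eq_some bd (0 : Int) hw
    subst hv; rw [hg]
    exact PySem.Dict.mem_items_of_get?_eq_some bd hw
  · intro hm
    have hg := PySem.Dict.get?_of_mem_items bd hm hnd
    refine ⟨?_, ?_⟩
    · rw [PySem.Dict.contains_eq_isSome_get?, hg]; rfl
    · rw [PySem.Dict.getD_of_get?_eq_some bd (0 : Int) hg]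

-- A's match count is an item-intersection count
lemma pv_matchCount_eq (cd bd : PySem.Dict String Int) (hnd : bd.keys.Nodup) :
    pvMatchCount cd bd = (cd.items.countP (fun kv => bd.items.contains kv) : Int) := by
  unfold pvMatchCount pvCompareLeaf
  rw [pv_foldl_add_ite (fun kv => kv.2 = bd.getD kv.1 0)]
  rw [zero_add, List.countP_filter]
  congr 1
  apply List.countP_congr
  intro kv _
  rw [← pv_item_test bd hnd kv]
  simp [Bool.and_comm]

-- A's inner loop is an existential
lemma pv_inner_iff (cd : PySem.Dict String Int) (bds : List (PySem.Dict String Int)) (k : Int) :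
    pvInner cd bds k = true ↔ ∃ bd ∈ bds, k ≤ pvMatchCount cd bd := by
  induction bds with
  | nil => simp [pvInner]
  | cons bd rest ih => by_cases h : k ≤ pvMatchCount cd bd <;> simp [pvInner, h, ih]

-- a nodup list filtered for one element
lemma pv_nodup_filter_beq {α : Type} [BEq α] [LawfulBEq α] (l : List α) (hnd : l.Nodup) (a : α) :
    l.filter (· == a) = if a ∈ l then [a] else [] := by
  rw [List.filter_beq]
  by_cases h : a ∈ l
  · simp [h, List.count_eq_one_of_mem hnd h]
  · simp [h, List.count_eq_zero_of_not_mem h]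

-- one base dict's contribution to the index
lemma pv_inner_fold (p1 : Nat) (xs : List (String × Int)) (hnd : xs.Nodup)
    (d : PySem.Dict (String × Int) (List Nat)) (it : String × Int) :
    (xs.foldl (fun idx x => idx.modify x [] (· ++ [p1])) d).getD it []
      = d.getD it [] ++ (if xs.contains it then [p1] else []) := by
  have h1 : (xs.map (fun x => (x, p1))).foldl (fun idx q => idx.modify q.1 [] (· ++ [q.2])) d
      = xs.foldl (fun idx x => idx.modify x [] (· ++ [p1])) d := by
    rw [List.foldl_map]
  rw [← h1, PySem.Dict.getD_foldl_modify_append]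
  congr 1
  rw [List.filter_map]
  simp only [Function.comp_def]
  rw [List.map_map]
  rw [show (List.filter (fun x => ((x, p1) : (String × Int) × Nat).1 == it) xs) = xs.filter (· == it) from rfl]
  rw [pv_nodup_filter_beq xs hnd it]
  by_cases h : it ∈ xs <;> simp [h]

-- the index-building double fold, characterised: the postings list of an item
lemma pv_index_getD (l : List (Nat × List (String × Int))) (d : PySem.Dict (String × Int) (List Nat))
    (hnd : ∀ p ∈ l, p.2.Nodup) (it : String × Int) :
    (l.foldl (fun idx p => p.2.foldl (fun idx x => idx.modify x [] (· ++ [p.1])) idx) d).getD it []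
      = d.getD it [] ++ (l.filter (fun p => p.2.contains it)).map (·.1) := by
  induction l generalizing d with
  | nil => simp
  | cons p l' ih =>
    simp only [List.foldl_cons]
    rw [ih _ (fun q hq => hnd q (List.mem_cons_of_mem _ hq))]
    rw [pv_inner_fold p.1 p.2 (hnd p List.mem_cons_self) d it]
    by_cases h : it ∈ p.2 <;> simp [h]

-- how often index i occurs in one item's postings
lemma pv_posting_count (E : List (Nat × List (String × Int))) (hE : (E.map (·.1)).Nodup)
    (p0 : Nat × List (String × Int)) (hp0 : p0 ∈ E) (it : String × Int) :
    ((E.filter (fun p => p.2.contains it)).map (·.1)).count p0.1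
      = if p0.2.contains it then 1 else 0 := by
  induction E with
  | nil => cases hp0
  | cons p E' ih =>
    have hnotin : p.1 ∉ E'.map (·.1) := by
      simp only [List.map_cons, List.nodup_cons] at hE; exact hE.1
    have hsub : ∀ x, x ∈ (E'.filter (fun q => q.2.contains it)).map (·.1) → x ∈ E'.map (·.1) := by
      intro x hx
      simp only [List.mem_map, List.mem_filter] at hx ⊢
      obtain ⟨q, ⟨hq, _⟩, hxq⟩ := hx
      exact ⟨q, hq, hxq⟩
    rcases List.mem_cons.mp hp0 with heq | hmem
    · subst heq
      have hz : ((E'.filter (fun q => q.2.contains it)).map (·.1)).count p0.1 = 0 :=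
        List.count_eq_zero_of_not_mem (fun h => hnotin (hsub _ h))
      by_cases h : it ∈ p0.2
      · simpa [h] using hz
      · simpa [h] using hz
    · have hne : p.1 ≠ p0.1 := by
        intro h
        exact hnotin (h ▸ List.mem_map.mpr ⟨p0, hmem, rfl⟩)
      have ih' := ih (by simp only [List.map_cons, List.nodup_cons] at hE; exact hE.2) hmem
      by_cases h : it ∈ p.2
      · simpa [h, List.count_cons, hne] using ih'
      · simpa [h] using ih'

-- total hit count of index i over all of comp's items
lemma pv_hits_count (E : List (Nat × List (String × Int))) (hE : (E.map (·.1)).Nodup)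
    (its : List (String × Int)) (p0 : Nat × List (String × Int)) (hp0 : p0 ∈ E) :
    (its.flatMap (fun it => ((E.filter (fun p => p.2.contains it)).map (·.1)))).count p0.1
      = its.countP (fun it => p0.2.contains it) := by
  induction its with
  | nil => simp
  | cons it its ih =>
    simp only [List.flatMap_cons, List.count_append, List.countP_cons, ih]
    rw [pv_posting_count E hE p0 hp0 it]
    by_cases h : it ∈ p0.2
    · simp [h]; omega
    · simp [h]

lemma pv_items_nodup (d : List (String × Int)) : (PySem.Dict.ofList d).items.Nodup :=
  (PySem.Dict.nodup_keys_ofList d).of_map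

-- pvEnumNat basics
lemma pv_enum_map_fst {α : Type} (l : List α) (s : Nat) :
    (pvEnumNat l s).map (·.1) = List.range' s l.length := by
  induction l generalizing s with
  | nil => simp [pvEnumNat]
  | cons x xs ih => simp [pvEnumNat, List.range'_succ, ih]

lemma pv_enum_map_snd {α : Type} (l : List α) (s : Nat) :
    (pvEnumNat l s).map (·.2) = l := by
  induction l generalizing s with
  | nil => rfl
  | cons x xs ih => simp [pvEnumNat, ih]

lemma pv_enum_mem {α : Type} (l : List α) (s j : Nat) (hj : j < l.length) :
    (s + j, l[j]) ∈ pvEnumNat l s := by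
  induction l generalizing s j with
  | nil => simp at hj
  | cons x xs ih =>
    cases j with
    | zero => simp [pvEnumNat]
    | succ j' =>
      have := ih (s + 1) j' (by simpa using hj)
      simp only [pvEnumNat, List.mem_cons]
      right
      have harith : s + (j' + 1) = s + 1 + j' := by omega
      rw [harith]
      simpa using this

lemma pv_enum_mem_iff {α : Type} (l : List α) (p : Nat × α) (hp : p ∈ pvEnumNat l 0) :
    ∃ j, ∃ h : j < l.length, p = (j, l[j]) := by
  induction l generalizing p with
  | nil => cases hp
  | cons x xs ih =>
    -- shift lemma: membership at start s+1 relates to start 0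
    rcases List.mem_cons.mp hp with heq | hmem
    · exact ⟨0, by simp, by simp [heq]⟩
    · -- p ∈ pvEnumNat xs 1; show p = (j+1, xs[j])
      have hshift : ∀ (l' : List α) (s : Nat) (q : Nat × α), q ∈ pvEnumNat l' s → (q.1 - s, q.2) ∈ pvEnumNat l' 0 ∧ s ≤ q.1 := by
        intro l'
        induction l' with
        | nil => intro s q hq; cases hq
        | cons y ys ih' =>
          intro s q hq
          rcases List.mem_cons.mp hq with h1 | h2
          · subst h1; simp [pvEnumNat]
          · obtain ⟨hm, hs⟩ := ih' (s+1) q h2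
            refine ⟨?_, by omega⟩
            simp only [pvEnumNat, List.mem_cons]
            right
            have : q.1 - s = (q.1 - (s+1)) + 1 := by omega
            rw [this]
            -- need: (m+1, v) ∈ pvEnumNat (y::ys) 0 ↔ (m, v) ∈ pvEnumNat ys 1 — prove a general shift-up
            have hup : ∀ (l'' : List α) (s' : Nat) (r : Nat × α), r ∈ pvEnumNat l'' s' → (r.1 + 1, r.2) ∈ pvEnumNat l'' (s' + 1) := by
              intro l''
              induction l'' with
              | nil => intro s' r hr; cases hr
              | cons z zs ih'' =>
                intro s' r hr
                rcases List.mem_cons.mp hr with ha | hb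
                · subst ha; simp [pvEnumNat]
                · exact List.mem_cons_of_mem _ (ih'' (s'+1) r hb)
            exact hup ys 0 (q.1 - (s+1), q.2) hm
      obtain ⟨hm0, hs⟩ := hshift xs 1 p hmem
      obtain ⟨j, hj, hje⟩ := ih _ hm0
      refine ⟨j + 1, by simpa using hj, ?_⟩
      have h1 : p.1 - 1 = j := by rw [Prod.ext_iff] at hje; exact hje.1
      have h2 : p.2 = xs[j] := by rw [Prod.ext_iff] at hje; exact hje.2
      have : p.1 = j + 1 := by omega
      rw [Prod.ext_iff]
      exact ⟨this, by simpa using h2⟩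

lemma pv_E_fst_nodup (base : List (List (String × Int))) :
    ((pvEnumNat (base.map (fun d => (PySem.Dict.ofList d).items)) 0).map (·.1)).Nodup := by
  rw [pv_enum_map_fst]
  exact List.nodup_range'

-- counts-array fold: length preserved
lemma pv_counts_len (hits : List Nat) (c : List Int) :
    (hits.foldl (fun c i => c.set i (c.getD i 0 + 1)) c).length = c.length := by
  induction hits generalizing c with
  | nil => rfl
  | cons i hs ih => rw [List.foldl_cons, ih, List.length_set]

-- counts-array fold: each in-range cell accumulates the count of its index
lemma pv_counts_getD (hits : List Nat) (c : List Int) (j : Nat) (hj : j < c.length) :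
    (hits.foldl (fun c i => c.set i (c.getD i 0 + 1)) c).getD j 0 = c.getD j 0 + hits.count j := by
  induction hits generalizing c with
  | nil => simp
  | cons i hs ih =>
    simp only [List.foldl_cons]
    rw [ih (c.set i (c.getD i 0 + 1)) (by simpa using hj)]
    by_cases h : i = j
    · subst h
      rw [List.getD_eq_getElem _ _ (by simpa using hj), List.getElem_set_self (by simpa using hj)]
      rw [List.getD_eq_getElem _ _ hj, List.count_cons]
      simp; omega
    · rw [List.getD_eq_getElem _ _ (by simpa using hj),
          List.getElem_set_ne (by omega), ← List.getD_eq_getElem c 0 hj, List.count_cons]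
      simp [h]

-- B's nested per-item loops flattened
lemma pv_counts_flat (its : List (String × Int)) (idx : PySem.Dict (String × Int) (List Nat)) (c : List Int) :
    its.foldl (fun c it => (idx.getD it []).foldl (fun c i => c.set i (c.getD i 0 + 1)) c) c
      = (its.flatMap (fun it => idx.getD it [])).foldl (fun c i => c.set i (c.getD i 0 + 1)) c := by
  rw [List.foldl_flatMap]

-- B's per-comp test, characterised
lemma pv_bcond_iff (base : List (List (String × Int))) (k : Int) (its : List (String × Int)) :
    ((its.foldl (fun c it => ((pvIndexB base).getD it []).foldl (fun c i => c.set i (c.getD i 0 + 1)) c)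
        (List.replicate base.length (0 : Int))).any (fun c => k ≤ c)) = true
      ↔ ∃ p ∈ pvEnumNat (base.map (fun d => (PySem.Dict.ofList d).items)) 0,
          k ≤ (its.countP (fun kv => p.2.contains kv) : Int) := by
  set E := pvEnumNat (base.map (fun d => (PySem.Dict.ofList d).items)) 0 with hEdef
  have hEsnd : ∀ p ∈ E, p.2.Nodup := by
    intro p hp
    have h2 : p.2 ∈ E.map (·.2) := List.mem_map.mpr ⟨p, hp, rfl⟩
    rw [hEdef, pv_enum_map_snd] at h2
    obtain ⟨d, _, heq⟩ := List.mem_map.mp h2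
    rw [← heq]; exact pv_items_nodup d
  have hgetD : ∀ it, (pvIndexB base).getD it [] = (E.filter (fun p => p.2.contains it)).map (·.1) := by
    intro it
    unfold pvIndexB
    rw [← hEdef, pv_index_getD _ _ hEsnd it, PySem.Dict.getD_empty, List.nil_append]
  rw [pv_counts_flat]
  set hits := its.flatMap (fun it => (pvIndexB base).getD it []) with hhitsdef
  have hhits : hits = its.flatMap (fun it => ((E.filter (fun p => p.2.contains it)).map (·.1))) := by
    rw [hhitsdef]; exact List.flatMap_congr (fun it _ => hgetD it)
  set counts := hits.foldl (fun c i => c.set i (c.getD i 0 + 1)) (List.replicate base.length (0 : Int)) with hcdef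
  have hclen : counts.length = base.length := by rw [hcdef, pv_counts_len, List.length_replicate]
  have hcval : ∀ j (hj : j < base.length), counts.getD j 0 = (hits.count j : Int) := by
    intro j hj
    rw [hcdef, pv_counts_getD _ _ j (by simpa using hj)]
    rw [List.getD_eq_getElem _ _ (by simpa using hj)]
    simp
  constructor
  · intro hany
    obtain ⟨x, hx, hkx⟩ := List.any_eq_true.mp hany
    obtain ⟨j, hj, hxe⟩ := List.mem_iff_getElem.mp hx
    have hjb : j < base.length := by omega
    have hx0 : x = counts.getD j 0 := by rw [List.getD_eq_getElem _ _ hj, hxe]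
    rw [hx0, hcval j hjb] at hkx
    -- hits.count j ≥ k > 0 region or k ≤ count; find the base dict j hits
    have hjE : (j, (base.map (fun d => (PySem.Dict.ofList d).items))[j]'(by simpa using hjb)) ∈ E := by
      rw [hEdef]
      have := pv_enum_mem (base.map (fun d => (PySem.Dict.ofList d).items)) 0 j (by simpa using hjb)
      simpa using this
    refine ⟨_, hjE, ?_⟩
    have hcnt := pv_hits_count E (by rw [hEdef]; exact pv_E_fst_nodup base) its _ hjE
    rw [← hhits] at hcnt
    simp only at hcnt
    simp only [decide_eq_true_eq] at hkx
    rw [hcnt] at hkx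
    simpa using hkx
  · rintro ⟨p, hpE, hk2⟩
    have hcnt := pv_hits_count E (by rw [hEdef]; exact pv_E_fst_nodup base) its p hpE
    rw [← hhits] at hcnt
    obtain ⟨j, hj, hpe⟩ := pv_enum_mem_iff _ p (by rw [← hEdef]; exact hpE)
    have hjb : j < base.length := by simpa using hj
    have hp1 : p.1 = j := by rw [hpe]
    refine List.any_eq_true.mpr ⟨counts.getD j 0, ?_, ?_⟩
    · rw [List.getD_eq_getElem _ _ (by omega)]
      exact List.mem_iff_getElem.mpr ⟨j, by omega, rfl⟩
    · rw [hcval j hjb, ← hp1, hcnt]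
      simpa using hk2

-- the two per-comp conditions agree
lemma pv_cond_eq (base : List (List (String × Int))) (k : Int) (d : List (String × Int)) :
    (((PySem.Dict.ofList d).items.foldl
        (fun c it => ((pvIndexB base).getD it []).foldl (fun c i => c.set i (c.getD i 0 + 1)) c)
        (List.replicate base.length (0 : Int))).any (fun c => k ≤ c))
      = pvInner (PySem.Dict.ofList d) (base.map (fun d => PySem.Dict.ofList d)) k := by
  rw [Bool.eq_iff_iff]
  rw [pv_bcond_iff base k ((PySem.Dict.ofList d).items)]
  rw [pv_inner_iff]
  constructor
  · rintro ⟨p, hpE, hcount⟩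
    have h2 : p.2 ∈ (pvEnumNat (base.map (fun d => (PySem.Dict.ofList d).items)) 0).map (·.2) :=
      List.mem_map.mpr ⟨p, hpE, rfl⟩
    rw [pv_enum_map_snd] at h2
    obtain ⟨d', hd', heq⟩ := List.mem_map.mp h2
    refine ⟨PySem.Dict.ofList d', List.mem_map.mpr ⟨d', hd', rfl⟩, ?_⟩
    rw [pv_matchCount_eq _ _ (PySem.Dict.nodup_keys_ofList d')]
    rw [← heq] at hcount
    exact hcount
  · rintro ⟨bd, hbd, hcount⟩
    obtain ⟨d', hd', rfl⟩ := List.mem_map.mp hbd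
    have h2 : (PySem.Dict.ofList d').items ∈ base.map (fun d => (PySem.Dict.ofList d).items) :=
      List.mem_map.mpr ⟨d', hd', rfl⟩
    rw [← pv_enum_map_snd (base.map (fun d => (PySem.Dict.ofList d).items)) 0] at h2
    obtain ⟨p, hpE, heq⟩ := List.mem_map.mp h2
    refine ⟨p, hpE, ?_⟩
    rw [pv_matchCount_eq _ _ (PySem.Dict.nodup_keys_ofList d')] at hcount
    rw [heq]
    exact hcount

-- ===== VERDICT (by name: the statement is the Claim_ definition above) =====
theorem find_similar_dicts_spec : Claim_equal_find_similar_dicts := by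
  intro base comp k _
  unfold Spec_find_similar_dicts find_similar_dicts find_similar_dicts_alt
  simp only []
  rw [List.foldl_map]
  apply PySem.List.foldl_congr_mem
  intros acc x _
  rw [pv_cond_eq base k x]
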